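-- pv_equiv track=rewrite | github.com/inon-peled/advent_of_code | y2018/d08/part2.py | solve
-- ===== SOURCE A (Python) =====
-- def solve(nums, start):
--     total = 0
--     num_children = nums[start]
--     num_metadata = nums[start + 1]
--     start += 2
--
--     if num_children == 0:
--         end = start + num_metadata
--         for j in range(start, end):
--             total += nums[j]
--         return total, end
--
--     child_values = [None]
--     for k in range(num_children):
--         t, e = solve(nums, start)
--         child_values.append(t)
--         start = e
--
--     end = start + num_metadata
--     for j in range(start, end):
--         m = nums[j]
--         if m < len(child_values):
--             t = child_values[m]
--             total += t
--
--     return total, end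
-- ===== SOURCE B (Python) =====
-- # Iterative single-pass parser: explicit stack of frames instead of recursion.
-- def solve(nums, start):
--     cursor = start
--     stack = []  # frames: [remaining_children, num_metadata, child_values, is_leaf]
--     while True:
--         c = nums[cursor]
--         m = nums[cursor + 1]
--         cursor += 2
--         stack.append([c, m, [None], c == 0])
--         while stack[-1][0] <= 0:
--             rem, meta, vals, leaf = stack.pop()
--             end = cursor + meta
--             total = 0
--             if leaf:
--                 for j in range(cursor, end):
--                     total += nums[j]
--             else:
--                 for j in range(cursor, end):
--                     mj = nums[j]
--                     if mj < len(vals):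
--                         total += vals[mj]
--             cursor = end
--             if not stack:
--                 return total, cursor
--             stack[-1][0] -= 1
--             stack[-1][2].append(total)
-- ===== Notes on version B (the rewrite author's own statement) =====
-- stated objective: alternative
-- what changed: A's recursive descent over the serialized tree is replaced by an iterative single-pass parser with an explicit stack of frames (remaining-children countdown, metadata count, child-value list with the [None] sentinel); same reads in the same order, no recursion.
import Mathlib
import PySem

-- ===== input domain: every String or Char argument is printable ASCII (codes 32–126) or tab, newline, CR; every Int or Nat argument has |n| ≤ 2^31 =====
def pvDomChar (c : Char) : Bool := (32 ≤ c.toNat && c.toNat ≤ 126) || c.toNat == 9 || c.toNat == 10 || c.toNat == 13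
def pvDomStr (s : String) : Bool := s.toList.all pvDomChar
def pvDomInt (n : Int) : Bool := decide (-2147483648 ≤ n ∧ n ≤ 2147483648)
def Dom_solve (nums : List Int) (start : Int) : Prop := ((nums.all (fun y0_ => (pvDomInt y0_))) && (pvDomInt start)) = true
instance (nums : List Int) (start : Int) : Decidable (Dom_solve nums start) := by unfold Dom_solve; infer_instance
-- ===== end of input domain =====

-- B replaces A's recursive descent by an iterative single-pass parser with an explicit
-- stack of frames (alternative decomposition, same asymptotic cost); return values only
-- are compared (neither version mutates its arguments).

-- ===== PORT A =====
-- A's leaf loop: 'for j in range(start, end): total += nums[j]'  (none = IndexError)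
def pvSumLeaf (nums : List Int) (a b : Int) : Option Int :=
  (PySem.List.pyRange a b 1).foldl
    (fun acc j => acc.bind (fun t => (PySem.List.pyGet? nums j).map (fun x => t + x))) (some 0)

-- A's metadata loop over child_values (the leading 'none' is Python's [None] sentinel;
-- hitting it is a TypeError, i.e. none)
def pvSumMeta (nums : List Int) (cvs : List (Option Int)) (a b : Int) : Option Int :=
  (PySem.List.pyRange a b 1).foldl
    (fun acc j => acc.bind (fun t =>
      (PySem.List.pyGet? nums j).bind (fun m =>
        if m < (cvs.length : Int) then
          match PySem.List.pyGet? cvs m with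
          | some (some v) => some (t + v)
          | _ => none
        else some t))) (some 0)

-- 'for k in range(n)' threading a state, stopping at the first exception (none)
def pvLoop {α : Type} (F : α → Option α) : Nat → α → Option α
  | 0, a => some a
  | k+1, a => (F a).bind (pvLoop F k)

-- A's recursion, made total with fuel (one unit per nesting level; 2·len+2 always
-- suffices on Pre_ inputs — a returning run of A never revisits a position on the
-- call chain, so its depth is below 2·len)
def solveF : Nat → List Int → Int → Option (Int × Int)
  | 0, _, _ => none
  | f+1, nums, start =>
    (PySem.List.pyGet? nums start).bind fun c =>
    (PySem.List.pyGet? nums (start+1)).bind fun m =>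
    if c = 0 then
      (pvSumLeaf nums (start+2) (start+2+m)).map (fun t => (t, start+2+m))
    else
      (pvLoop (fun pc => (solveF f nums pc.1).map (fun te => (te.2, pc.2 ++ [some te.1])))
        c.toNat (start+2, ([none] : List (Option Int)))).bind fun pc =>
      (pvSumMeta nums pc.2 pc.1 (pc.1+m)).map (fun t => (t, pc.1+m))

def solve (nums : List Int) (start : Int) : Int × Int :=
  (solveF (2*nums.length+2) nums start).getD (0, 0)

-- ===== PORT B =====
-- a frame: (remaining children, num_metadata, child values (leading None sentinel), is_leaf)
abbrev PvFrame := Int × Int × List (Option Int) × Bool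

-- B's leaf summing loop (same Python statement as in A)
def pvTotLeaf (nums : List Int) (a b : Int) : Option Int :=
  (PySem.List.pyRange a b 1).foldl
    (fun acc j => acc.bind (fun t => (PySem.List.pyGet? nums j).map (fun x => t + x))) (some 0)

-- B's metadata loop over a frame's child values
def pvTotMeta (nums : List Int) (vals : List (Option Int)) (a b : Int) : Option Int :=
  (PySem.List.pyRange a b 1).foldl
    (fun acc j => acc.bind (fun t =>
      (PySem.List.pyGet? nums j).bind (fun m =>
        if m < (vals.length : Int) then
          match PySem.List.pyGet? vals m with
          | some (some v) => some (t + v)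
          | _ => none
        else some t))) (some 0)

-- B's inner 'while stack[-1][0] <= 0' loop: pop completed frames, propagating totals
def pvClose (nums : List Int) : Int → PvFrame → List PvFrame → Sum (Option (Int × Int)) (Int × PvFrame × List PvFrame)
  | cursor, (rem, mta, vals, leaf), rest =>
    if rem ≤ 0 then
      match (if leaf then pvTotLeaf nums cursor (cursor+mta) else pvTotMeta nums vals cursor (cursor+mta)) with
      | none => Sum.inl none
      | some total =>
        match rest with
        | [] => Sum.inl (some (total, cursor+mta))
        | fr2 :: rest2 => pvClose nums (cursor+mta) (fr2.1 - 1, fr2.2.1, fr2.2.2.1 ++ [some total], fr2.2.2.2) rest2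
    else Sum.inr (cursor, (rem, mta, vals, leaf), rest)

-- B's outer 'while True' loop: read a header, push a frame, close completed frames
-- (fuel: one unit per node; the bound below covers every Pre_ input inside Dom)
def pvRun : Nat → List Int → Int → List PvFrame → Option (Int × Int)
  | 0, _, _, _ => none
  | f+1, nums, cursor, stack =>
    (PySem.List.pyGet? nums cursor).bind fun c =>
    (PySem.List.pyGet? nums (cursor+1)).bind fun m =>
    match pvClose nums (cursor+2) (c, m, [none], c == 0) stack with
    | Sum.inl res => res
    | Sum.inr (c', fr', st') => pvRun f nums c' (fr' :: st')

def solve_alt (nums : List Int) (start : Int) : Int × Int :=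
  (pvRun (2 ^ (32 * (2*nums.length + 2))) nums start []).getD (0, 0)

-- ===== PRECONDITION & SPEC =====
-- Pre_solve holds exactly when Python A returns normally: nums encodes, at position
-- start, a well-formed node (headers and all metadata reads in range, and each
-- metadata reference of an internal node with k children avoids the [None] sentinel,
-- i.e. lies in {-k,…,-1} ∪ {1,2,…}).  Outside Pre_ A raises (IndexError, TypeError on
-- the None sentinel, or RecursionError on inputs whose parse never terminates).
-- Well-formedness of a serialized tree is inherently recursive; the acceptor below
-- checks shape only and computes no output value.  Its budget (2·len+2) is exact, not
-- a size cap: a returning run of A never repeats a position along its call chain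
-- (else it would not terminate), and every chained position is a readable index, so
-- the nesting depth of any returning run is below 2·len.
def pvValid : Nat → List Int → List Int → Int → Option Int
  | 0, _, _, _ => none
  | b+1, nums, chain, s =>
    if s ∈ chain then none else
    (PySem.List.pyGet? nums s).bind fun c =>
    (PySem.List.pyGet? nums (s+1)).bind fun m =>
    if c = 0 then
      (if s+2+m ≤ s+2 ∨ (-(nums.length : Int) ≤ s+2 ∧ s+2+m ≤ (nums.length : Int))
       then some (s+2+m) else none)
    else
      (pvLoop (fun q => pvValid b nums (s::chain) q) c.toNat (s+2)).bind fun p =>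
      if p+m ≤ p ∨ (-(nums.length : Int) ≤ p ∧ p+m ≤ (nums.length : Int)) then
        (if (PySem.List.pyRange p (p+m) 1).all (fun j =>
              match PySem.List.pyGet? nums j with
              | some mj => decide (-((c.toNat : Int)) ≤ mj ∧ mj ≠ 0)
              | none => false)
         then some (p+m) else none)
      else none

def Pre_solve (nums : List Int) (start : Int) : Prop :=
  (pvValid (2*nums.length+2) nums [] start).isSome = true
instance (nums : List Int) (start : Int) : Decidable (Pre_solve nums start) := by
  unfold Pre_solve; infer_instance

def pvWitness_solve : List Int × Int := ([1, 1, 0, 1, 5, 1], 0)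

def Spec_solve (nums : List Int) (start : Int) (out : Int × Int) : Prop := out = solve_alt nums start
instance (nums : List Int) (start : Int) (out : Int × Int) : Decidable (Spec_solve nums start out) := by
  unfold Spec_solve; infer_instance

-- ===== CLAIM (what is proved, stated in full; the proofs are below) =====
def Claim_equal_solve : Prop := ∀ (nums : List Int) (start : Int), Dom_solve nums start → Pre_solve nums start → Spec_solve nums start (solve nums start)

-- ===== LEMMAS AND PROOFS =====

-- continuation of B's machine after a whole subtree with value t and end e has been
-- consumed in front of stack st (proof-only helper)
def pvCont (nums : List Int) (st : List PvFrame) (t e : Int) (m : Nat) : Option (Int × Int) :=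
  match st with
  | [] => some (t, e)
  | fr :: rest =>
    match pvClose nums e (fr.1 - 1, fr.2.1, fr.2.2.1 ++ [some t], fr.2.2.2) rest with
    | Sum.inl res => res
    | Sum.inr (c', fr', st') => pvRun m nums c' (fr' :: st')

lemma pvTotLeaf_eq (nums : List Int) (a b : Int) : pvTotLeaf nums a b = pvSumLeaf nums a b := rfl
lemma pvTotMeta_eq (nums : List Int) (vals : List (Option Int)) (a b : Int) :
    pvTotMeta nums vals a b = pvSumMeta nums vals a b := rfl

-- a contiguous block of in-range indices is entirely readable
lemma pvRangeReadable (nums : List Int) (a b : Int)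
    (h : b ≤ a ∨ (-(nums.length : Int) ≤ a ∧ b ≤ (nums.length : Int))) :
    ∀ j ∈ PySem.List.pyRange a b 1, (PySem.List.pyGet? nums j).isSome = true := by
  intro j hj
  rw [PySem.List.mem_pyRange_one] at hj
  rw [Option.isSome_iff_ne_none]
  intro hn
  rw [PySem.List.pyGet?_eq_none_iff] at hn
  rcases h with h | h
  · omega
  · exact hn ⟨by omega, by omega⟩

lemma pvFoldSome {α : Type} (l : List α) (step : Int → α → Option Int)
    (h : ∀ j ∈ l, ∀ x : Int, ∃ y, step x j = some y) :
    ∀ a0 : Int, ∃ t, l.foldl (fun acc j => acc.bind (fun t => step t j)) (some a0) = some t := by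
  induction l with
  | nil => exact fun a0 => ⟨a0, rfl⟩
  | cons j l ih =>
    intro a0
    obtain ⟨y, hy⟩ := h j (List.mem_cons_self) a0
    rw [List.foldl_cons]
    simp only [Option.bind_some, hy]
    exact ih (fun j hj => h j (List.mem_cons_of_mem _ hj)) y

lemma pvLeafSome (nums : List Int) (a b : Int)
    (h : ∀ j ∈ PySem.List.pyRange a b 1, (PySem.List.pyGet? nums j).isSome = true) :
    ∃ t, pvSumLeaf nums a b = some t := by
  unfold pvSumLeaf
  refine pvFoldSome _ (fun t j => (PySem.List.pyGet? nums j).map (fun x => t + x)) ?_ 0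
  intro j hj x
  obtain ⟨v, hv⟩ := Option.isSome_iff_exists.mp (h j hj)
  exact ⟨x + v, by simp [hv]⟩

lemma pvConsMapGet (ts : List Int) (i : Int) (h1 : -(ts.length : Int) ≤ i) (h2 : i ≠ 0)
    (h3 : i < (ts.length : Int) + 1) :
    ∃ v : Int, PySem.List.pyGet? (none :: ts.map some) i = some (some v) := by
  rcases lt_trichotomy i 0 with hi | hi | hi
  · -- negative index wraps
    have hk1 : 0 < (-i).toNat := by omega
    have hk2 : (-i).toNat ≤ (none :: ts.map some).length := by
      simp only [List.length_cons, List.length_map]; omega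
    have hi' : i = -(((-i).toNat : Nat) : Int) := by omega
    rw [hi', PySem.List.pyGet?_neg_natCast _ _ hk1 hk2]
    have hlen : (none :: ts.map some).length = ts.length + 1 := by
      simp only [List.length_cons, List.length_map]
    set k := (-i).toNat with hk
    have hj : (none :: ts.map some).length - k = (ts.length - k) + 1 := by omega
    have hjl : ts.length - k < ts.length := by omega
    rw [hj]
    simp only [List.getElem?_cons_succ, List.getElem?_map]
    rw [List.getElem?_eq_getElem hjl]
    exact ⟨ts[ts.length - k], rfl⟩
  · omega
  · -- positive index
    rw [PySem.List.pyGet?_of_nonneg _ (by omega : (0:Int) ≤ i)]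
    have hj : i.toNat = (i.toNat - 1) + 1 := by omega
    have hjl : i.toNat - 1 < ts.length := by omega
    rw [hj]
    simp only [List.getElem?_cons_succ, List.getElem?_map]
    rw [List.getElem?_eq_getElem hjl]
    exact ⟨ts[i.toNat - 1], rfl⟩

lemma pvMetaSome (nums : List Int) (ts : List Int) (a b : Int)
    (h : ∀ j ∈ PySem.List.pyRange a b 1, ∃ mj, PySem.List.pyGet? nums j = some mj ∧
          (-(ts.length : Int) ≤ mj ∧ mj ≠ 0)) :
    ∃ t, pvSumMeta nums (none :: ts.map some) a b = some t := by
  unfold pvSumMeta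
  refine pvFoldSome _ (fun t j => (PySem.List.pyGet? nums j).bind (fun m =>
        if m < ((none :: ts.map some).length : Int) then
          match PySem.List.pyGet? (none :: ts.map some) m with
          | some (some v) => some (t + v)
          | _ => none
        else some t)) ?_ 0
  intro j hj x
  obtain ⟨mj, hg, hge, hne⟩ := h j hj
  simp only [hg, Option.bind_some]
  by_cases hlt : mj < ((none :: ts.map some).length : Int)
  · rw [if_pos hlt]
    have h3 : mj < (ts.length : Int) + 1 := by
      simpa only [List.length_cons, List.length_map, Nat.cast_add, Nat.cast_one] using hlt
    obtain ⟨v, hv⟩ := pvConsMapGet ts mj hge hne h3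
    rw [hv]
    exact ⟨x + v, rfl⟩
  · rw [if_neg hlt]
    exact ⟨x, rfl⟩

-- children phase, A side: if the acceptor accepts k consecutive children, A's child
-- loop returns the same final position and appends one (non-None) value per child
lemma pvKidsA (nums : List Int) (b : Nat)
    (ih : ∀ (chain : List Int) (s e : Int), pvValid b nums chain s = some e → ∃ t, solveF b nums s = some (t, e))
    (ch : List Int) :
    ∀ (k : Nat) (p p' : Int) (cvs : List (Option Int)),
      pvLoop (fun q => pvValid b nums ch q) k p = some p' →
      ∃ ts : List Int, ts.length = k ∧
        pvLoop (fun pc => (solveF b nums pc.1).map (fun te => (te.2, pc.2 ++ [some te.1])))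
          k (p, cvs) = some (p', cvs ++ ts.map some) := by
  intro k
  induction k with
  | zero =>
    intro p p' cvs h
    simp only [pvLoop, Option.some.injEq] at h
    exact ⟨[], rfl, by simp [pvLoop, h]⟩
  | succ k ihk =>
    intro p p' cvs h
    simp only [pvLoop] at h
    cases hv : pvValid b nums ch p with
    | none => rw [hv] at h; exact absurd h (by simp)
    | some e1 =>
      rw [hv, Option.bind_some] at h
      obtain ⟨t1, ht1⟩ := ih ch p e1 hv
      obtain ⟨ts', hlen, hiter⟩ := ihk e1 p' (cvs ++ [some t1]) h
      refine ⟨t1 :: ts', by simp [hlen], ?_⟩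
      simp only [pvLoop, ht1, Option.map_some, Option.bind_some]
      rw [hiter]
      simp

-- A's port returns (with the same end) wherever the acceptor accepts
lemma pvValidA (nums : List Int) : ∀ (b : Nat) (chain : List Int) (s e : Int),
    pvValid b nums chain s = some e → ∃ t, solveF b nums s = some (t, e) := by
  intro b
  induction b with
  | zero => intro chain s e h; simp [pvValid] at h
  | succ b ih =>
    intro chain s e h
    rw [pvValid] at h
    by_cases hch : s ∈ chain
    · rw [if_pos hch] at h; exact absurd h (by simp)
    rw [if_neg hch] at h
    cases hc : PySem.List.pyGet? nums s with
    | none => rw [hc] at h; exact absurd h (by simp)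
    | some c =>
    rw [hc, Option.bind_some] at h
    cases hm : PySem.List.pyGet? nums (s+1) with
    | none => rw [hm] at h; exact absurd h (by simp)
    | some m =>
    rw [hm, Option.bind_some] at h
    by_cases h0 : c = 0
    · rw [if_pos h0] at h
      by_cases hall : s+2+m ≤ s+2 ∨ (-(nums.length : Int) ≤ s+2 ∧ s+2+m ≤ (nums.length : Int))
      case neg => rw [if_neg hall] at h; exact absurd h (by simp)
      rw [if_pos hall] at h
      obtain ⟨rfl⟩ : s + 2 + m = e := by injection h
      obtain ⟨t0, ht0⟩ := pvLeafSome nums (s+2) (s+2+m) (pvRangeReadable nums _ _ hall)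
      refine ⟨t0, ?_⟩
      rw [solveF, hc, Option.bind_some, hm, Option.bind_some, if_pos h0, ht0]
      rfl
    · rw [if_neg h0] at h
      cases hit : pvLoop (fun q => pvValid b nums (s::chain) q) c.toNat (s+2) with
      | none => rw [hit] at h; exact absurd h (by simp)
      | some p =>
      rw [hit, Option.bind_some] at h
      by_cases hg : p+m ≤ p ∨ (-(nums.length : Int) ≤ p ∧ p+m ≤ (nums.length : Int))
      case neg => rw [if_neg hg] at h; exact absurd h (by simp)
      rw [if_pos hg] at h
      by_cases hall : ((PySem.List.pyRange p (p+m) 1).all (fun j =>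
            match PySem.List.pyGet? nums j with
            | some mj => decide (-((c.toNat : Int)) ≤ mj ∧ mj ≠ 0)
            | none => false)) = true
      case neg => rw [if_neg hall] at h; exact absurd h (by simp)
      rw [if_pos hall] at h
      obtain ⟨rfl⟩ : p + m = e := by injection h
      obtain ⟨ts, hlen, hiter⟩ := pvKidsA nums b ih (s::chain) c.toNat (s+2) p ([none]) hit
      have hmeta : ∀ j ∈ PySem.List.pyRange p (p+m) 1, ∃ mj, PySem.List.pyGet? nums j = some mj ∧
          (-(ts.length : Int) ≤ mj ∧ mj ≠ 0) := by
        intro j hj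
        have := List.all_eq_true.mp hall j hj
        cases hg : PySem.List.pyGet? nums j with
        | none => rw [hg] at this; simp at this
        | some mj =>
          rw [hg] at this
          simp only [decide_eq_true_eq] at this
          exact ⟨mj, rfl, by rw [hlen]; exact this⟩
      obtain ⟨t0, ht0⟩ := pvMetaSome nums ts p (p+m) hmeta
      refine ⟨t0, ?_⟩
      rw [solveF, hc, Option.bind_some, hm, Option.bind_some, if_neg h0]
      rw [hiter, Option.bind_some]
      have : ([none] : List (Option Int)) ++ ts.map some = none :: ts.map some := rfl
      rw [this, ht0]
      rfl

-- after pvClose pops a completed frame the machine continues exactly as pvCont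
lemma pvClosePop (nums : List Int) (cursor mta : Int) (vals : List (Option Int)) (leaf : Bool)
    (rem : Int) (rest : List PvFrame) (t : Int) (m : Nat) (hr : rem ≤ 0)
    (ht : (if leaf then pvTotLeaf nums cursor (cursor+mta) else pvTotMeta nums vals cursor (cursor+mta)) = some t) :
    (match pvClose nums cursor (rem, mta, vals, leaf) rest with
     | Sum.inl res => res
     | Sum.inr (c', fr', st') => pvRun m nums c' (fr' :: st')) = pvCont nums rest t (cursor+mta) m := by
  rw [pvClose, if_pos hr, ht]
  cases rest with
  | nil => rfl
  | cons fr2 rest2 => rfl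

-- one step of B's machine: reading a header whose node has pending children
lemma pvRunStep (f : Nat) (nums : List Int) (cursor : Int) (stack : List PvFrame) (c m : Int)
    (hc : PySem.List.pyGet? nums cursor = some c) (hm : PySem.List.pyGet? nums (cursor+1) = some m)
    (hpos : ¬ c ≤ 0) :
    pvRun (f+1) nums cursor stack = pvRun f nums (cursor+2) ((c, m, [none], c == 0) :: stack) := by
  rw [pvRun, hc, Option.bind_some, hm, Option.bind_some, pvClose, if_neg hpos]

-- one step of B's machine: reading a header whose node completes immediately
lemma pvRunPop (f : Nat) (nums : List Int) (cursor : Int) (stack : List PvFrame) (c m t : Int)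
    (hc : PySem.List.pyGet? nums cursor = some c) (hm : PySem.List.pyGet? nums (cursor+1) = some m)
    (hneg : c ≤ 0)
    (ht : (if (c == 0) then pvTotLeaf nums (cursor+2) (cursor+2+m)
           else pvTotMeta nums [none] (cursor+2) (cursor+2+m)) = some t) :
    pvRun (f+1) nums cursor stack = pvCont nums stack t (cursor+2+m) f := by
  rw [pvRun, hc, Option.bind_some, hm, Option.bind_some]
  exact pvClosePop nums (cursor+2) m [none] (c == 0) c stack t f hneg ht

-- closing the top frame when its last child has just been consumed
lemma pvContPop (nums : List Int) (fr : PvFrame) (rest : List PvFrame) (t1 e1 t : Int) (m : Nat)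
    (hr : fr.1 - 1 ≤ 0)
    (ht : (if fr.2.2.2 then pvTotLeaf nums e1 (e1+fr.2.1)
           else pvTotMeta nums (fr.2.2.1 ++ [some t1]) e1 (e1+fr.2.1)) = some t) :
    pvCont nums (fr :: rest) t1 e1 m = pvCont nums rest t (e1+fr.2.1) m := by
  obtain ⟨r, mta, vals, leaf⟩ := fr
  simp only [pvCont]
  exact pvClosePop nums e1 mta (vals ++ [some t1]) leaf (r-1) rest t m hr ht

-- handing the cursor to the next sibling when the top frame still has children pending
lemma pvContStep (nums : List Int) (fr : PvFrame) (rest : List PvFrame) (t1 e1 : Int) (m : Nat)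
    (hr : ¬ fr.1 - 1 ≤ 0) :
    pvCont nums (fr :: rest) t1 e1 m
      = pvRun m nums e1 ((fr.1 - 1, fr.2.1, fr.2.2.1 ++ [some t1], fr.2.2.2) :: rest) := by
  obtain ⟨r, mta, vals, leaf⟩ := fr
  simp only [pvCont]
  rw [pvClose, if_neg hr]

-- children phase, B side: while A's child loop consumes k subtrees, B's machine walks
-- the same subtrees under a frame whose countdown starts at k
lemma pvKidSim (nums : List Int) (f : Nat)
    (hsim : ∀ (s t e : Int) (st : List PvFrame), solveF f nums s = some (t, e) →
      ∃ n ≤ 2^(32*f), ∀ m, pvRun (n+m) nums s st = pvCont nums st t e m) :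
    ∀ (k : Nat) (p p' mta t : Int) (cvs cvs' : List (Option Int)) (st : List PvFrame), 0 < k →
      pvLoop (fun pc => (solveF f nums pc.1).map (fun te => (te.2, pc.2 ++ [some te.1])))
        k (p, cvs) = some (p', cvs') →
      pvTotMeta nums cvs' p' (p'+mta) = some t →
      ∃ n ≤ k * 2^(32*f), ∀ m, pvRun (n+m) nums p (((k : Int), mta, cvs, false) :: st) = pvCont nums st t (p'+mta) m := by
  intro k
  induction k with
  | zero => intro p p' mta t cvs cvs' st hk _ _; exact absurd hk (by omega)
  | succ k ihk =>
    intro p p' mta t cvs cvs' st _ hit hmt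
    simp only [pvLoop] at hit
    cases hs1 : solveF f nums p with
    | none =>
      rw [hs1] at hit
      exact absurd hit (by simp)
    | some te =>
      obtain ⟨t1, e1⟩ := te
      rw [hs1] at hit
      simp only [Option.map_some, Option.bind_some] at hit
      obtain ⟨n1, hn1, hrun1⟩ := hsim p t1 e1 ((((k+1 : Nat) : Int), mta, cvs, false) :: st) hs1
      by_cases hk0 : k = 0
      · subst hk0
        simp only [pvLoop, Option.some.injEq, Prod.mk.injEq] at hit
        obtain ⟨rfl, rfl⟩ := hit
        refine ⟨n1, by simpa using hn1, fun m => ?_⟩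
        rw [hrun1 m]
        rw [pvContPop nums (((0+1 : Nat) : Int), mta, cvs, false) st t1 e1 t m (by norm_num)
          (by simp only []; rw [if_neg (by simp : ¬ (false = true))]; rw [pvTotMeta_eq]; exact hmt)]
      · have hkpos : 0 < k := by omega
        obtain ⟨n2, hn2, hrun2⟩ := ihk e1 p' mta t (cvs ++ [some t1]) cvs' st hkpos hit hmt
        have hcast : ((k+1 : Nat) : Int) - 1 = (k : Int) := by push_cast; ring
        refine ⟨n1 + n2, ?_, fun m => ?_⟩
        · have he : (k+1) * 2^(32*f) = k * 2^(32*f) + 2^(32*f) := by ring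
          omega
        · rw [show n1 + n2 + m = n1 + (n2 + m) by omega, hrun1 (n2+m)]
          rw [pvContStep nums (((k+1 : Nat) : Int), mta, cvs, false) st t1 e1 (n2+m)
            (by simp only []; omega)]
          simp only []
          rw [hcast]
          exact hrun2 m

-- the simulation: whenever A's recursion returns (t, e) on a subtree, B's machine,
-- started at that subtree with any stack, consumes exactly n fuel (n bounded via Dom)
-- and continues as pvCont
lemma pvSim (nums : List Int) (hdom : ∀ x ∈ nums, x ≤ 2^31) :
    ∀ (f : Nat) (s t e : Int) (st : List PvFrame), solveF f nums s = some (t, e) →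
    ∃ n ≤ 2^(32*f), ∀ m, pvRun (n+m) nums s st = pvCont nums st t e m := by
  intro f
  induction f with
  | zero => intro s t e st h; simp [solveF] at h
  | succ f ihf =>
    intro s t e st h
    rw [solveF] at h
    cases hc : PySem.List.pyGet? nums s with
    | none => rw [hc] at h; exact absurd h (by simp)
    | some c =>
    rw [hc, Option.bind_some] at h
    cases hm : PySem.List.pyGet? nums (s+1) with
    | none => rw [hm] at h; exact absurd h (by simp)
    | some m =>
    rw [hm, Option.bind_some] at h
    have hcmem : c ∈ nums := PySem.List.mem_of_pyGet?_eq_some nums hc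
    by_cases h0 : c = 0
    · rw [if_pos h0] at h
      cases hsl : pvSumLeaf nums (s+2) (s+2+m) with
      | none => rw [hsl] at h; exact absurd h (by simp)
      | some t0 =>
      rw [hsl] at h
      simp only [Option.map_some, Option.some.injEq, Prod.mk.injEq] at h
      obtain ⟨rfl, rfl⟩ := h
      refine ⟨1, Nat.one_le_two_pow, fun m2 => ?_⟩
      rw [Nat.add_comm 1 m2]
      exact pvRunPop m2 nums s st c m t0 hc hm (by omega)
        (by rw [show (c == 0) = true by simp [h0]]; rw [if_pos rfl]; rw [pvTotLeaf_eq]; exact hsl)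
    · rw [if_neg h0] at h
      cases hit : pvLoop (fun pc => (solveF f nums pc.1).map (fun te => (te.2, pc.2 ++ [some te.1])))
          c.toNat (s+2, ([none] : List (Option Int))) with
      | none => rw [hit] at h; exact absurd h (by simp)
      | some pc =>
      obtain ⟨p, cvs⟩ := pc
      rw [hit, Option.bind_some] at h
      cases hsm : pvSumMeta nums cvs p (p+m) with
      | none => rw [hsm] at h; exact absurd h (by simp)
      | some t0 =>
      rw [hsm] at h
      simp only [Option.map_some, Option.some.injEq, Prod.mk.injEq] at h
      obtain ⟨rfl, rfl⟩ := h
      by_cases hcpos : 0 < c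
      · have hrw : ((c.toNat : Nat) : Int) = c := Int.toNat_of_nonneg (by omega)
        obtain ⟨n2, hn2, hrun2⟩ := pvKidSim nums f ihf c.toNat (s+2) p m t0
          ([none]) cvs st (by omega) hit (by rw [pvTotMeta_eq]; exact hsm)
        have hcb : c.toNat ≤ 2^31 := by have := hdom c hcmem; omega
        refine ⟨n2 + 1, ?_, fun m2 => ?_⟩
        · have h1 : n2 ≤ 2^31 * 2^(32*f) :=
            le_trans hn2 (Nat.mul_le_mul_right _ hcb)
          have h2 : (2:Nat)^(32*(f+1)) = 2^31 * 2^(32*f) * 2 := by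
            rw [show 32*(f+1) = 31 + (32*f+1) by ring, pow_add, pow_add]; ring
          have h3 : 0 < 2^31 * 2^(32*f) := by positivity
          omega
        · rw [show n2 + 1 + m2 = (n2 + m2) + 1 by omega]
          rw [pvRunStep (n2+m2) nums s st c m hc hm (by omega)]
          rw [show (c == 0) = false by simp [h0]]
          rw [← hrw]
          exact hrun2 m2
      · have hcn : c.toNat = 0 := by omega
        rw [hcn] at hit
        simp only [pvLoop, Option.some.injEq, Prod.mk.injEq] at hit
        obtain ⟨rfl, rfl⟩ := hit
        refine ⟨1, Nat.one_le_two_pow, fun m2 => ?_⟩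
        rw [Nat.add_comm 1 m2]
        exact pvRunPop m2 nums s st c m t0 hc hm (by omega)
          (by rw [show (c == 0) = false by simp [h0]]; rw [if_neg (by simp : ¬ (false = true))];
              rw [pvTotMeta_eq]; exact hsm)

-- ===== VERDICT (by name: the statement is the Claim_ definition above) =====
theorem solve_spec : Claim_equal_solve := by
  unfold Claim_equal_solve
  intro nums start hdom hpre
  unfold Spec_solve
  have hdom' : ∀ x ∈ nums, x ≤ 2^31 := by
    unfold Dom_solve at hdom
    simp only [Bool.and_eq_true, List.all_eq_true, pvDomInt, decide_eq_true_eq] at hdom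
    intro x hx
    have := hdom.1 x hx
    omega
  unfold Pre_solve at hpre
  obtain ⟨e, he⟩ := Option.isSome_iff_exists.mp hpre
  obtain ⟨t, ht⟩ := pvValidA nums (2*nums.length+2) [] start e he
  obtain ⟨n, hn, hrun⟩ := pvSim nums hdom' (2*nums.length+2) start t e [] ht
  have hfuel : n + (2^(32*(2*nums.length+2)) - n) = 2^(32*(2*nums.length+2)) := by omega
  have hb := hrun (2^(32*(2*nums.length+2)) - n)
  rw [hfuel] at hb
  unfold solve solve_alt
  rw [ht, hb]
  rfl
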